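-- pv_equiv track=rewrite | github.com/nikspatel007/priority-lens | scripts/compute_priority_contexts.py | extract_key_participants
-- ===== SOURCE A (Python) =====
-- from collections import Counter, defaultdict
--
-- def extract_key_participants(senders: list[str], top_n: int = 5) -> list[str]:
--     """Extract most frequent senders, filtering generic domains."""
--     if not senders:
--         return []
--
--     generic_domains = {
--         'gmail.com', 'yahoo.com', 'hotmail.com', 'outlook.com',
--         'googlemail.com', 'aol.com', 'icloud.com', 'me.com',
--     }
--
--     filtered = []
--     for sender in senders:
--         if not sender or '@' not in sender:
--             continue
--         domain = sender.split('@')[1].lower()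
--         if domain not in generic_domains:
--             filtered.append(sender)
--
--     if not filtered:
--         filtered = [s for s in senders if s]
--
--     return [p[0] for p in Counter(filtered).most_common(top_n)]
-- ===== SOURCE B (Python) =====
-- def extract_key_participants(senders: list[str], top_n: int = 5) -> list[str]:
--     """Extract most frequent senders, filtering generic domains.
--
--     Different strategy: count every non-empty sender once into one dict,
--     restrict that dict to non-generic-domain keys (falling back to the full
--     dict when nothing survives), then select the top_n keys WITHOUT sorting:
--     keys are grouped into buckets by count and emitted by scanning counts
--     from the maximum downward (counting-sort selection with early exit).
--     """
--     generic_domains = {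
--         'gmail.com', 'yahoo.com', 'hotmail.com', 'outlook.com',
--         'googlemail.com', 'aol.com', 'icloud.com', 'me.com',
--     }
--
--     counts = {}
--     for s in senders:
--         if s:
--             counts[s] = counts.get(s, 0) + 1
--
--     accepted = {k: c for k, c in counts.items()
--                 if '@' in k and k.split('@')[1].lower() not in generic_domains}
--     if accepted:
--         counts = accepted
--
--     if top_n <= 0 or not counts:
--         return []
--
--     buckets = {}
--     for k, c in counts.items():
--         buckets.setdefault(c, []).append(k)
--
--     result = []
--     for c in range(max(buckets), 0, -1):
--         for k in buckets.get(c, []):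
--             result.append(k)
--             if len(result) == top_n:
--                 return result
--     return result
-- ===== Notes on version B (the rewrite author's own statement) =====
-- stated objective: alternative
-- what changed: B counts every non-empty sender into a single dict, restricts that dict to non-generic-domain keys (falling back to the full dict) instead of filtering the sender list, and picks the top_n keys without any sort: keys are grouped into buckets by count and emitted by scanning counts from the maximum downward with an early exit (counting-sort selection), whereas A builds a filtered occurrence list, re-filters on fallback, and takes Counter(...).most_common (a comparison sort).
import Mathlib
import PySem

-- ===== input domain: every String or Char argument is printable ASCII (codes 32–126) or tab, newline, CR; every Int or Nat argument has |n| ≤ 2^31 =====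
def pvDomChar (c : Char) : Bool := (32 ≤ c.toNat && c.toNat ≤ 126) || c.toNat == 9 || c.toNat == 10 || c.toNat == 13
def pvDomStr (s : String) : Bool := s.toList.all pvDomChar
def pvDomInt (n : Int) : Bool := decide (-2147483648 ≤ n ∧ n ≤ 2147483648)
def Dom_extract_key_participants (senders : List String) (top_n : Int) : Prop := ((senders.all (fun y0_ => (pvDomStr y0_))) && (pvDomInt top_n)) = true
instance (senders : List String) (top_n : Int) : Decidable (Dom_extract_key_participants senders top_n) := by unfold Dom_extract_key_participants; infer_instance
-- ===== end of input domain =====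

-- B counts every non-empty sender into ONE dict, restricts it to non-generic keys (fallback to
-- the full dict), and selects the top_n keys WITHOUT sorting, by bucketing keys per count and
-- scanning counts from the maximum downward with early exit; alternative algorithm, no speed claim.

-- the generic-domain set literal both Pythons define
def pvGeneric : PySem.Set String :=
  PySem.Set.ofList ["gmail.com", "yahoo.com", "hotmail.com", "outlook.com",
    "googlemail.com", "aol.com", "icloud.com", "me.com"]

-- ===== PORT A =====
def extract_key_participants (senders : List String) (top_n : Int) : List String :=
  if senders = [] then []
  else
    let filtered := senders.foldl (fun acc sender =>
      if sender == "" || !(PySem.Str.isIn "@" sender) then acc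
      else
        -- '@' in sender guarantees split has ≥ 2 parts, so the getD defaults are never used
        let domain := PySem.Str.lower (((PySem.Str.split? sender "@").getD []).getD 1 "")
        if pvGeneric.contains domain then acc else acc ++ [sender]) []
    let filtered2 := if filtered = [] then senders.filter (fun s => !(s == "")) else filtered
    let c := PySem.Dict.counter filtered2
    -- Counter.most_common(n) = stable reverse sort of items by count, first n, [] when n ≤ 0
    let mc := if top_n ≤ 0 then [] else (PySem.List.sorted c.items (fun p => p.2) true).take top_n.toNat
    mc.map (fun p => p.1)

-- ===== PORT B =====
-- inner 'for k in buckets.get(c, [])' loop with its 'return result' early exit (flag = returned)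
def pvEmitBucket (top_n : Int) : List String → List String → List String × Bool
  | [], res => (res, false)
  | k :: ks, res =>
      let res' := res ++ [k]
      if (res'.length : Int) = top_n then (res', true) else pvEmitBucket top_n ks res'

-- outer 'for c in range(max(buckets), 0, -1)' loop, stopping when the inner loop returned
def pvEmitAll (buckets : PySem.Dict Int (List String)) (top_n : Int) : List Int → List String → List String
  | [], res => res
  | c :: cs, res =>
      let r := pvEmitBucket top_n (buckets.getD c []) res
      if r.2 then r.1 else pvEmitAll buckets top_n cs r.1

def extract_key_participants_alt (senders : List String) (top_n : Int) : List String :=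
  let counts := senders.foldl (fun d s => if s == "" then d else d.insert s (d.getD s 0 + 1)) PySem.Dict.empty
  let accepted := PySem.Dict.ofList (counts.items.filter (fun kv =>
    PySem.Str.isIn "@" kv.1 &&
      !(pvGeneric.contains (PySem.Str.lower (((PySem.Str.split? kv.1 "@").getD []).getD 1 "")))))
  let counts2 := if accepted.items = [] then counts else accepted
  if top_n ≤ 0 || counts2.items = [] then []
  else
    let buckets := counts2.items.foldl (fun b kv => b.modify kv.2 [] (fun l => l ++ [kv.1])) PySem.Dict.empty
    let maxc := (PySem.List.max? buckets.keys (fun x => x)).getD 0   -- buckets nonempty here, so max() exists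
    pvEmitAll buckets top_n (PySem.List.pyRange maxc 0 (-1)) []

-- ===== PRECONDITION & SPEC =====
def Spec_extract_key_participants (senders : List String) (top_n : Int) (out : List String) : Prop := out = extract_key_participants_alt senders top_n
instance (senders : List String) (top_n : Int) (out : List String) : Decidable (Spec_extract_key_participants senders top_n out) := by unfold Spec_extract_key_participants; infer_instance

-- ===== CLAIM (what is proved, stated in full; the proofs are below) =====
def Claim_equal_extract_key_participants : Prop := ∀ (senders : List String) (top_n : Int), Dom_extract_key_participants senders top_n → Spec_extract_key_participants senders top_n (extract_key_participants senders top_n)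

-- ===== LEMMAS AND PROOFS =====

-- the '@'-and-domain test both programs apply (A per occurrence, B per distinct key)
def pvAt (s : String) : Bool :=
  PySem.Str.isIn "@" s &&
    !(pvGeneric.contains (PySem.Str.lower (((PySem.Str.split? s "@").getD []).getD 1 "")))

def pvNe (s : String) : Bool := !(s == "")

def pvAccept (s : String) : Bool := pvNe s && pvAt s

lemma a_filtered_eq (senders : List String) :
    senders.foldl (fun acc sender =>
      if sender == "" || !(PySem.Str.isIn "@" sender) then acc
      else
        let domain := PySem.Str.lower (((PySem.Str.split? sender "@").getD []).getD 1 "")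
        if pvGeneric.contains domain then acc else acc ++ [sender]) [] =
    senders.filter pvAccept := by
  have h : (fun (acc : List String) (sender : String) =>
      if sender == "" || !(PySem.Str.isIn "@" sender) then acc
      else
        let domain := PySem.Str.lower (((PySem.Str.split? sender "@").getD []).getD 1 "")
        if pvGeneric.contains domain then acc else acc ++ [sender]) =
      (fun acc x => if pvAccept x then acc ++ [x] else acc) := by
    funext acc x
    by_cases hx : x = "" <;>
      by_cases hi : PySem.Str.isIn "@" x = true <;>
      by_cases hg : pvGeneric.contains
        (PySem.Str.lower (((PySem.Str.split? x "@").getD []).getD 1 "")) = true <;>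
      simp only [pvAccept, pvNe, pvAt, hx, hi, hg] <;> simp [hx]
  rw [h]
  simpa using PySem.List.foldl_append_if pvAccept id senders []

lemma b_counts_eq (senders : List String) :
    senders.foldl (fun d s => if s == "" then d else d.insert s (d.getD s 0 + 1)) PySem.Dict.empty =
    PySem.Dict.counter (senders.filter pvNe) := by
  have h : (fun (d : PySem.Dict String Int) s => if s == "" then d else d.insert s (d.getD s 0 + 1)) =
      (fun d s => if pvNe s then d.insert s (d.getD s 0 + 1) else d) := by
    funext d s; by_cases hs : s = "" <;> simp [pvNe, hs]
  rw [h, PySem.List.foldl_if_eq_foldl_filter,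
    PySem.Dict.foldl_insert_getD_add_one_eq_counter]

lemma set_ofList_filter (p : String → Bool) (ys : List String) :
    PySem.Set.ofList (ys.filter p) = (PySem.Set.ofList ys).filter p := by
  induction ys using List.reverseRecOn with
  | nil => rfl
  | append_singleton ys y ih =>
    rw [List.filter_append, PySem.Set.ofList_append_singleton]
    by_cases hp : p y = true
    · rw [show List.filter p [y] = [y] from by simp [hp], PySem.Set.ofList_append_singleton, ih]
      simp only [PySem.Set.add, PySem.Set.contains]
      by_cases hc : y ∈ PySem.Set.ofList ys
      · have hc' : y ∈ (PySem.Set.ofList ys).filter p := List.mem_filter.2 ⟨hc, hp⟩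
        simp [hc, hc']
      · have hc' : y ∉ (PySem.Set.ofList ys).filter p := fun h => hc (List.mem_filter.1 h).1
        simp [hc, hc', List.filter_append, hp]
    · have hp' : p y = false := by simpa using hp
      rw [show List.filter p [y] = [] from by simp [hp'], List.append_nil, ih]
      simp only [PySem.Set.add, PySem.Set.contains]
      by_cases hc : y ∈ PySem.Set.ofList ys
      · simp [hc]
      · simp [hc, List.filter_append, hp']

lemma counter_items_nil_iff (xs : List String) :
    (PySem.Dict.counter xs).items = [] ↔ xs = [] := by
  rw [PySem.Dict.items_counter]
  constructor
  · intro h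
    cases xs with
    | nil => rfl
    | cons x l =>
      have hx : x ∈ PySem.Set.ofList (x :: l) := (PySem.Set.mem_ofList _ _).2 (List.mem_cons_self ..)
      rcases List.eq_nil_of_map_eq_nil h with h'
      simp [h'] at hx
  · intro h; subst h; rfl

lemma accepted_items_eq (ys : List String) :
    ((PySem.Dict.counter ys).items.filter (fun kv => pvAt kv.1)) =
    (PySem.Dict.counter (ys.filter pvAt)).items := by
  rw [PySem.Dict.items_counter, PySem.Dict.items_counter, List.filter_map]
  rw [set_ofList_filter]
  have hcomp : ((fun kv : String × Int => pvAt kv.1) ∘ (fun k => (k, (List.count k ys : Int)))) = pvAt := rfl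
  rw [hcomp]
  apply List.map_congr_left
  intro k hk
  have hp : pvAt k = true := (List.mem_filter.1 hk).2
  rw [List.count_filter hp]

lemma filter_accept_eq (senders : List String) :
    (senders.filter pvNe).filter pvAt = senders.filter pvAccept := by
  rw [List.filter_filter]
  apply List.filter_congr
  intro x _
  simp [pvAccept, Bool.and_comm]

-- counts in a Counter are ≥ 1
lemma counter_count_pos (xs : List String) (kv : String × Int)
    (h : kv ∈ (PySem.Dict.counter xs).items) : 1 ≤ kv.2 := by
  rw [PySem.Dict.items_counter] at h
  rcases List.mem_map.1 h with ⟨k, hk, rfl⟩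
  have : k ∈ xs := (PySem.Set.mem_ofList _ _).1 hk
  have := List.count_pos_iff.2 this
  simpa using Int.ofNat_le.2 this

-- ---- insertBy into a bucketed list ----

lemma insertBy_cons {α : Type} (before : α → α → Bool) (x h : α) (l : List α) :
    PySem.List.insertBy before x (h :: l) =
      if before x h then x :: h :: l else h :: PySem.List.insertBy before x l := by
  simp [PySem.List.insertBy]

lemma insertBy_append_of_not {α : Type} (before : α → α → Bool) (x : α) (H T : List α)
    (hH : ∀ y ∈ H, before x y = false) :
    PySem.List.insertBy before x (H ++ T) = H ++ PySem.List.insertBy before x T := by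
  induction H with
  | nil => simp
  | cons h hs ih =>
    have hh : before x h = false := hH h (List.mem_cons_self ..)
    rw [List.cons_append, insertBy_cons, hh]
    simp only [Bool.false_eq_true, if_false, List.cons_append]
    rw [ih (fun y hy => hH y (List.mem_cons_of_mem _ hy))]

lemma mem_flatMap_buckets (cs : List Int) (xs : List (String × Int)) (y : String × Int)
    (hy : y ∈ cs.flatMap (fun c => xs.filter (fun p => p.2 == c))) : y.2 ∈ cs := by
  rcases List.mem_flatMap.1 hy with ⟨c, hc, hyc⟩
  have := (List.mem_filter.1 hyc).2
  have : y.2 = c := by simpa using this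
  rw [this]; exact hc

lemma insert_bucket (x : String × Int) :
    ∀ (cs : List Int), cs.Pairwise (fun a b => b < a) → x.2 ∈ cs →
    ∀ (xs : List (String × Int)),
    PySem.List.insertBy (fun a b : String × Int => decide (b.2 < a.2)) x
      (cs.flatMap (fun c => xs.filter (fun p => p.2 == c))) =
    cs.flatMap (fun c => (xs ++ [x]).filter (fun p => p.2 == c)) := by
  intro cs
  induction cs with
  | nil => intro _ hx; exact absurd hx (by simp)
  | cons c cs' ih =>
    intro hdec hx xs
    have hdec' := (List.pairwise_cons.1 hdec).2
    have hlt := (List.pairwise_cons.1 hdec).1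
    simp only [List.flatMap_cons]
    by_cases hxc : x.2 = c
    · -- x belongs to the head bucket: it is appended at the end of that bucket
      have hH : ∀ y ∈ xs.filter (fun p => p.2 == c), (fun a b : String × Int => decide (b.2 < a.2)) x y = false := by
        intro y hy
        have : y.2 = c := by simpa using (List.mem_filter.1 hy).2
        simp [this, hxc]
      rw [insertBy_append_of_not _ _ _ _ hH]
      have hT : PySem.List.insertBy (fun a b : String × Int => decide (b.2 < a.2)) x
          (cs'.flatMap (fun c => xs.filter (fun p => p.2 == c))) =
          x :: cs'.flatMap (fun c => xs.filter (fun p => p.2 == c)) := by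
        cases hrest : cs'.flatMap (fun c => xs.filter (fun p => p.2 == c)) with
        | nil => rfl
        | cons t ts =>
          have ht : t.2 ∈ cs' := mem_flatMap_buckets cs' xs t (by rw [hrest]; exact List.mem_cons_self ..)
          have : t.2 < x.2 := by rw [hxc]; exact hlt _ ht
          simp [PySem.List.insertBy, this]
      rw [hT]
      have htail : cs'.flatMap (fun c => (xs ++ [x]).filter (fun p => p.2 == c)) =
          cs'.flatMap (fun c => xs.filter (fun p => p.2 == c)) := by
        apply List.flatMap_congr  -- may need a congr form
        intro c' hc'
        rw [List.filter_append]
        have : x.2 ≠ c' := by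
          intro h; exact absurd (h ▸ hlt c' hc') (by rw [hxc]; exact lt_irrefl c)
        simp [this]
      rw [htail, List.filter_append]
      simp [hxc]
    · -- x belongs to a later bucket
      have hx' : x.2 ∈ cs' := by rcases List.mem_cons.1 hx with h | h; exact absurd h hxc; exact h
      have hH : ∀ y ∈ xs.filter (fun p => p.2 == c), (fun a b : String × Int => decide (b.2 < a.2)) x y = false := by
        intro y hy
        have hyc : y.2 = c := by simpa using (List.mem_filter.1 hy).2
        have : x.2 < c := hlt _ hx'
        simp [hyc]; omega
      rw [insertBy_append_of_not _ _ _ _ hH, ih hdec' hx' xs]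
      have : (xs ++ [x]).filter (fun p => p.2 == c) = xs.filter (fun p => p.2 == c) := by
        rw [List.filter_append]
        simp [hxc]
      rw [this]

lemma sorted_rev_buckets (cs : List Int) (hdec : cs.Pairwise (fun a b => b < a)) :
    ∀ xs : List (String × Int), (∀ p ∈ xs, p.2 ∈ cs) →
    PySem.List.sorted xs (fun p => p.2) true = cs.flatMap (fun c => xs.filter (fun p => p.2 == c)) := by
  intro xs
  induction xs using List.reverseRecOn with
  | nil => intro _; simp [PySem.List.sorted]
  | append_singleton xs x ih =>
    intro hmem
    rw [PySem.List.sorted_rev_eq_foldl_insertBy, List.foldl_append]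
    simp only [List.foldl_cons, List.foldl_nil]
    rw [← PySem.List.sorted_rev_eq_foldl_insertBy,
      ih (fun p hp => hmem p (List.mem_append_left _ hp)),
      insert_bucket x cs hdec (hmem x (List.mem_append_right _ (List.mem_cons_self ..))) xs]

-- ---- the early-exit emission loops compute 'take' ----

lemma pvEmitBucket_spec (n : Int) (ks : List String) :
    ∀ res : List String, (res.length : Int) < n →
    pvEmitBucket n ks res =
      (res ++ ks.take (n - res.length).toNat, decide (n ≤ (res.length : Int) + ks.length)) := by
  induction ks with
  | nil =>
    intro res h
    simp [pvEmitBucket]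
    omega
  | cons k ks ih =>
    intro res h
    simp only [pvEmitBucket, List.length_append, List.length_cons, List.length_nil]
    by_cases he : ((res.length + 1 : Nat) : Int) = n
    · have h1 : (n - res.length).toNat = 1 := by omega
      rw [if_pos (by push_cast; push_cast at he; omega)]
      have : n ≤ (res.length : Int) + (ks.length + 1) := by push_cast; omega
      simp [h1, this]
    · rw [if_neg (by push_cast at he; omega)]
      have h' : (((res ++ [k]).length : Nat) : Int) < n := by
        simp only [List.length_append, List.length_cons, List.length_nil]; push_cast; push_cast at he; omega
      rw [ih (res ++ [k]) h']
      have h2 : (n - res.length).toNat = (n - ((res ++ [k]).length : Nat)).toNat + 1 := by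
        simp only [List.length_append, List.length_cons, List.length_nil]; omega
      rw [h2, List.take_succ_cons]
      simp only [Prod.mk.injEq]
      refine ⟨by simp, ?_⟩
      simp only [List.length_append, List.length_cons, List.length_nil]
      rw [decide_eq_decide]
      push_cast
      omega

lemma pvEmitAll_spec (b : PySem.Dict Int (List String)) (n : Int) (cs : List Int) :
    ∀ res : List String, (res.length : Int) < n →
    pvEmitAll b n cs res = res ++ (cs.flatMap (fun c => b.getD c [])).take (n - res.length).toNat := by
  induction cs with
  | nil => intro res h; simp [pvEmitAll]
  | cons c cs ih =>
    intro res h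
    simp only [pvEmitAll]
    rw [pvEmitBucket_spec n _ res h]
    by_cases hf : n ≤ (res.length : Int) + (b.getD c []).length
    · rw [if_pos (by simpa using hf)]
      simp only [List.flatMap_cons, List.take_append]
      have h0 : (n - res.length).toNat - (b.getD c []).length = 0 := by omega
      rw [h0]
      simp
    · rw [if_neg (by simpa using hf)]
      have htake : (b.getD c []).take (n - res.length).toNat = b.getD c [] :=
        List.take_of_length_le (by omega)
      have hlen : (((res ++ b.getD c []).length : Nat) : Int) < n := by
        simp only [List.length_append]; push_cast; omega
      rw [htake, ih _ hlen]
      have hrest : ((n - res.length).toNat - (b.getD c []).length) =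
          (n - (((res ++ b.getD c []).length : Nat) : Int)).toNat := by
        simp only [List.length_append]; push_cast; omega
      rw [List.flatMap_cons, List.take_append, htake, hrest, List.append_assoc]


lemma dict_ofList_items (l : List (String × Int)) (h : (l.map (fun p => p.1)).Nodup) :
    (PySem.Dict.ofList l).items = l := by
  have hc : ∀ a ∈ l, (PySem.Dict.empty : PySem.Dict String Int).contains
      ((fun p : String × Int => p.1) a) = false := by
    intro a _; rfl
  have := PySem.Dict.items_foldl_insert_fresh l (fun p => p.1) (fun p => p.2) PySem.Dict.empty hc h
  simpa [PySem.Dict.ofList, PySem.Dict.update] using this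

lemma pyRange_down (m : Int) (hm : 0 < m) :
    PySem.List.pyRange m 0 (-1) = (List.range m.toNat).map (fun k : Nat => m - (k : Int)) := by
  simp only [PySem.List.pyRange]
  rw [if_neg (by norm_num)]
  rw [if_neg (show ¬ ((0:Int) < -1) by norm_num), if_pos hm]
  have h2 : ((m - 0 + -(-1) - 1) / -(-1) : Int) = m := by norm_num
  rw [h2]
  apply List.map_congr_left
  intro k _
  ring

lemma mem_range_down (m c : Int) (h1 : 1 ≤ c) (h2 : c ≤ m) :
    c ∈ (List.range m.toNat).map (fun k : Nat => m - (k : Int)) := by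
  refine List.mem_map.2 ⟨(m - c).toNat, List.mem_range.2 (by omega), by omega⟩

lemma pairwise_range_down (m : Int) :
    ((List.range m.toNat).map (fun k : Nat => m - (k : Int))).Pairwise (fun a b => b < a) := by
  rw [List.pairwise_map]
  exact List.pairwise_lt_range.imp (by intro a b h; omega)

-- B evaluated: both sides of the claim reduce to this common form
lemma b_eval (senders : List String) (top_n : Int) :
    extract_key_participants_alt senders top_n =
    if top_n ≤ 0 then []
    else ((PySem.List.sorted (PySem.Dict.counter
        (if senders.filter pvAccept = [] then senders.filter pvNe else senders.filter pvAccept)).items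
        (fun p => p.2) true).map (fun p => p.1)).take top_n.toNat := by
  unfold extract_key_participants_alt
  simp only [b_counts_eq]
  rw [show (fun kv : String × Int => PySem.Str.isIn "@" kv.1 &&
      !(pvGeneric.contains (PySem.Str.lower (((PySem.Str.split? kv.1 "@").getD []).getD 1 "")))) =
      (fun kv => pvAt kv.1) from rfl]
  rw [accepted_items_eq, filter_accept_eq]
  have hnodup : (((PySem.Dict.counter (senders.filter pvAccept)).items.map (fun p => p.1)).Nodup) := by
    have := PySem.Dict.nodup_keys_counter (senders.filter pvAccept)
    simpa [PySem.Dict.keys] using this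
  have hacc : PySem.Dict.ofList (PySem.Dict.counter (senders.filter pvAccept)).items =
      PySem.Dict.counter (senders.filter pvAccept) :=
    PySem.Dict.ext (dict_ofList_items _ hnodup)
  rw [hacc]
  simp only [counter_items_nil_iff]
  rw [show (if senders.filter pvAccept = [] then PySem.Dict.counter (senders.filter pvNe)
        else PySem.Dict.counter (senders.filter pvAccept)) =
      PySem.Dict.counter (if senders.filter pvAccept = [] then senders.filter pvNe
        else senders.filter pvAccept) from by split <;> rfl]
  by_cases ht : top_n ≤ 0
  · simp [ht]
  · simp only [ht, if_false, Bool.false_or, decide_false]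
    set zs := (if senders.filter pvAccept = [] then senders.filter pvNe else senders.filter pvAccept) with hzs
    by_cases hz : zs = []
    · rw [hz]
      simp [PySem.Dict.counter, PySem.Dict.empty, PySem.List.sorted]
    · have hitems_ne : (PySem.Dict.counter zs).items ≠ [] := fun h => hz ((counter_items_nil_iff zs).1 h)
      rw [if_neg (by simpa using hitems_ne)]
      set items := (PySem.Dict.counter zs).items with hitems
      set bks := items.foldl (fun b kv => b.modify kv.2 [] (fun l => l ++ [kv.1])) PySem.Dict.empty with hbks
      have hgetD : ∀ c, bks.getD c [] = (items.filter (fun p => p.2 == c)).map (fun p => p.1) := by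
        intro c
        have h0 := PySem.Dict.getD_foldl_modify_append (items.map (fun kv => (kv.2, kv.1))) PySem.Dict.empty c
        rw [List.foldl_map] at h0
        rw [hbks]
        rw [show (fun (b : PySem.Dict Int (List String)) (kv : String × Int) =>
            b.modify kv.2 [] (fun l => l ++ [kv.1])) =
          (fun (d : PySem.Dict Int (List String)) (kv : String × Int) =>
            d.modify ((fun kv : String × Int => (kv.2, kv.1)) kv).1 [] (fun x => x ++ [((fun kv : String × Int => (kv.2, kv.1)) kv).2])) from rfl]
        rw [h0]
        simp [List.filter_map, Function.comp_def]
      have hkeys : bks.keys = PySem.Set.ofList (items.map (fun kv => kv.2)) := by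
        rw [hbks]
        have h1 := PySem.Dict.keys_foldl_modify_key items (fun kv : String × Int => kv.2) []
          (fun _ kv => (fun l => l ++ [kv.1])) PySem.Dict.empty
        rw [h1, PySem.Dict.keys_empty]
        rfl
      have hkeys_ne : bks.keys ≠ [] := by
        rw [hkeys]
        intro hcon
        cases hi : items with
        | nil => exact hitems_ne hi
        | cons p ps =>
          have hp2 : p.2 ∈ items.map (fun kv => kv.2) :=
            List.mem_map.2 ⟨p, by rw [hi]; exact List.mem_cons_self .., rfl⟩
          have hmem := (PySem.Set.mem_ofList _ _).2 hp2
          rw [hcon] at hmem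
          simp at hmem
      cases hmax : PySem.List.max? bks.keys (fun x => x) with
      | none => exact absurd ((PySem.List.max?_eq_none_iff _ _).1 hmax) hkeys_ne
      | some m =>
        have hub : ∀ kv ∈ items, kv.2 ≤ m := by
          intro kv hkv
          have : kv.2 ∈ bks.keys := by
            rw [hkeys]; exact (PySem.Set.mem_ofList _ _).2 (List.mem_map.2 ⟨kv, hkv, rfl⟩)
          exact PySem.List.max?_isMax hmax _ this
        have hm_mem : ∃ kv ∈ items, kv.2 = m := by
          have := PySem.List.max?_mem hmax
          rw [hkeys] at this
          exact List.mem_map.1 ((PySem.Set.mem_ofList _ _).1 this)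
        have hm_pos : 1 ≤ m := by
          rcases hm_mem with ⟨kv, hkv, hkvm⟩
          have := counter_count_pos zs kv (by rw [← hitems]; exact hkv)
          omega
        have hmem : ∀ p ∈ items, p.2 ∈ (List.range m.toNat).map (fun k : Nat => m - (k : Int)) := by
          intro p hp
          exact mem_range_down m p.2 (counter_count_pos zs p (by rw [← hitems]; exact hp)) (hub p hp)
        simp only [Option.getD_some]
        rw [pyRange_down m (by omega),
          pvEmitAll_spec bks top_n _ [] (by simp; omega)]
        simp only [List.nil_append, List.length_nil, Nat.cast_zero, sub_zero]
        simp only [hgetD]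
        rw [← List.map_flatMap,
          ← sorted_rev_buckets _ (pairwise_range_down m) items hmem]

lemma a_eval (senders : List String) (top_n : Int) :
    extract_key_participants senders top_n =
    if top_n ≤ 0 then []
    else ((PySem.List.sorted (PySem.Dict.counter
        (if senders.filter pvAccept = [] then senders.filter pvNe else senders.filter pvAccept)).items
        (fun p => p.2) true).map (fun p => p.1)).take top_n.toNat := by
  unfold extract_key_participants
  by_cases hs : senders = []
  · subst hs
    simp [PySem.Dict.counter, PySem.Dict.empty, PySem.List.sorted]
  · rw [if_neg hs]
    simp only [a_filtered_eq]
    rw [show (fun s : String => !(s == "")) = pvNe from rfl]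
    by_cases ht : top_n ≤ 0
    · simp [ht]
    · simp only [ht, if_false]
      rw [← List.map_take]

-- ===== VERDICT (by name: the statement is the Claim_ definition above) =====
theorem extract_key_participants_spec : Claim_equal_extract_key_participants := by
  intro senders top_n _
  unfold Spec_extract_key_participants
  rw [a_eval, b_eval]
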